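-- pv_equiv track=rewrite | github.com/poemsilver/Algorithm | on Programmers/DP/[L3] 숫자 타자 대회.py | solution
-- ===== SOURCE A (Python) =====
-- from collections import deque
--
-- def solution(numbers):
--     answer = 0
--     m = {}
--     # 가중치 map
--     m['0'] = [1, 7, 6, 7, 5, 4, 5, 3, 2, 3]
--     m['1'] = [7, 1, 2, 4, 2, 3, 5, 4, 5, 6]
--     m['2'] = [6, 2, 1, 2, 3, 2, 3, 5, 4, 5]
--     m['3'] = [7, 4, 2, 1, 5, 3, 2, 6, 5, 4]
--     m['4'] = [5, 2, 3, 5, 1, 2, 4, 2, 3, 5]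
--     m['5'] = [4, 3, 2, 3, 2, 1, 2, 3, 2, 3]
--     m['6'] = [5, 5, 3, 2, 4, 2, 1, 5, 3, 2]
--     m['7'] = [3, 4, 5, 6, 2, 3, 5, 1, 2, 4]
--     m['8'] = [2, 5, 4, 5, 3, 2, 3, 2, 1, 2]
--     m['9'] = [3, 6, 5, 4, 5, 3, 2, 4, 2, 1]
--
--     # 위치랑 쌓인 가중치
--     #(왼쪽,오른쪽,가중치)
--     q = deque()
--     # 경우의 수, 가중치 저장
--     dic = {}
--     dic[('4','6')] = 0
--
--     for i in range(len(numbers)):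
--         n = numbers[i]
--         now_dic = {}
--
--         for lp,rp in dic.keys():
--             q.append((lp,rp,dic[(lp,rp)]))
--
--         while q:
--             l,r,c = q.popleft()
--             l_cnt = m[l][int(n)]
--             r_cnt = m[r][int(n)]
--
--             if l == n:
--                 # 왼쪽이 움직이고, 가중치 1
--                 if (n,r) not in now_dic.keys() or now_dic[(n,r)] > c + 1:
--                     now_dic[(n,r)] = c + 1
--             elif r == n:
--                 # 오른쪽이 움직이고, 가중치 1
--                 if (l,n) not in now_dic.keys()  or now_dic[(l,n)] > c + 1:
--                     now_dic[(l,n)] = c + 1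
--
--             else:
--                 # 왼쪽 움직였을 때
--                 if (n,r) not in now_dic.keys() or now_dic[(n,r)] > c + l_cnt:
--                     now_dic[(n,r)] = c + l_cnt
--                 # 오른쪽 움직였을 때
--                 if (l,n) not in now_dic.keys() or now_dic[(l,n)] > c + r_cnt:
--                     now_dic[(l,n)] = c + r_cnt
--         # 기록 갱신
--         dic = now_dic
--
--     return min(dic.values())
-- ===== SOURCE B (Python) =====
-- def solution(numbers):
--     # backward bottom-up DP over a full 10x10 table:
--     # g[l][r] = min cost to type the remaining suffix with fingers on l and r
--     M = [
--         [1, 7, 6, 7, 5, 4, 5, 3, 2, 3],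
--         [7, 1, 2, 4, 2, 3, 5, 4, 5, 6],
--         [6, 2, 1, 2, 3, 2, 3, 5, 4, 5],
--         [7, 4, 2, 1, 5, 3, 2, 6, 5, 4],
--         [5, 2, 3, 5, 1, 2, 4, 2, 3, 5],
--         [4, 3, 2, 3, 2, 1, 2, 3, 2, 3],
--         [5, 5, 3, 2, 4, 2, 1, 5, 3, 2],
--         [3, 4, 5, 6, 2, 3, 5, 1, 2, 4],
--         [2, 5, 4, 5, 3, 2, 3, 2, 1, 2],
--         [3, 6, 5, 4, 5, 3, 2, 4, 2, 1],
--     ]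
--     g = [[0] * 10 for _ in range(10)]
--     for ch in reversed(numbers):
--         n = int(ch)
--         g = [[(1 + g[n][r]) if l == n else
--               (1 + g[l][n]) if r == n else
--               min(M[l][n] + g[n][r], M[r][n] + g[l][n])
--               for r in range(10)] for l in range(10)]
--     return g[4][6]
-- ===== Notes on version B (the rewrite author's own statement) =====
-- stated objective: simpler
-- what changed: Replaced A's forward BFS over a dict of reachable (left,right) states fed through a deque by a backward bottom-up DP that rebuilds a full 10x10 cost-to-go table per character and reads off g[4][6].
import Mathlib
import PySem

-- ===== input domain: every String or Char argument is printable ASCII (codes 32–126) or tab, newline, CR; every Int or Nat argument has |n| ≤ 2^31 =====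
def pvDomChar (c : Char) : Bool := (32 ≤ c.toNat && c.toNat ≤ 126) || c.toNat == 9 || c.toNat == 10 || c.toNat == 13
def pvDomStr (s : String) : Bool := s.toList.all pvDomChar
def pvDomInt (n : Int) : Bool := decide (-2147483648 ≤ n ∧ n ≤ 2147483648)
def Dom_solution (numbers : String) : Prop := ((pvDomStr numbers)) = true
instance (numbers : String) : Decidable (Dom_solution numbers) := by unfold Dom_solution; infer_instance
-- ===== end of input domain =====

-- B replaces A's forward BFS over a dict of reachable finger states (fed through a deque)
-- by a backward bottom-up DP over a full 10x10 cost-to-go table (objective: simpler).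

-- ===== PORT A =====
-- weight map m (dict from digit char to row of costs), built by the same ten inserts
def pvMA : PySem.Dict Char (List Int) :=
  (((((((((PySem.Dict.empty.insert '0' [1, 7, 6, 7, 5, 4, 5, 3, 2, 3]).insert
    '1' [7, 1, 2, 4, 2, 3, 5, 4, 5, 6]).insert
    '2' [6, 2, 1, 2, 3, 2, 3, 5, 4, 5]).insert
    '3' [7, 4, 2, 1, 5, 3, 2, 6, 5, 4]).insert
    '4' [5, 2, 3, 5, 1, 2, 4, 2, 3, 5]).insert
    '5' [4, 3, 2, 3, 2, 1, 2, 3, 2, 3]).insert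
    '6' [5, 5, 3, 2, 4, 2, 1, 5, 3, 2]).insert
    '7' [3, 4, 5, 6, 2, 3, 5, 1, 2, 4]).insert
    '8' [2, 5, 4, 5, 3, 2, 3, 2, 1, 2]).insert
    '9' [3, 6, 5, 4, 5, 3, 2, 4, 2, 1]

-- int(n) for the one-character string numbers[i]
def pvIntA (c : Char) : Int := (PySem.Int.ofChars? [c]).getD 0

-- 'if k not in now_dic.keys() or now_dic[k] > v: now_dic[k] = v'
def pvSetMin (nd : PySem.Dict (Char × Char) Int) (k : Char × Char) (v : Int) :
    PySem.Dict (Char × Char) Int :=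
  if !nd.contains k || nd.getD k 0 > v then nd.insert k v else nd

-- body of 'while q: l, r, c = q.popleft(); …'
def pvInner (n : Char) (nd : PySem.Dict (Char × Char) Int) (t : (Char × Char) × Int) :
    PySem.Dict (Char × Char) Int :=
  let l := t.1.1
  let r := t.1.2
  let c := t.2
  let lcnt := PySem.List.pyGetD (pvMA.getD l []) (pvIntA n) 0
  let rcnt := PySem.List.pyGetD (pvMA.getD r []) (pvIntA n) 0
  if l = n then pvSetMin nd (n, r) (c + 1)
  else if r = n then pvSetMin nd (l, n) (c + 1)
  else pvSetMin (pvSetMin nd (n, r) (c + lcnt)) (l, n) (c + rcnt)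

-- one iteration of 'for i in range(len(numbers))': fill q from dic, drain it into now_dic
def pvOuter (dic : PySem.Dict (Char × Char) Int) (n : Char) : PySem.Dict (Char × Char) Int :=
  let q := dic.keys.map (fun k => (k, dic.getD k 0))
  q.foldl (pvInner n) PySem.Dict.empty

def solution (numbers : String) : Int :=
  let dic0 := PySem.Dict.empty.insert ('4', '6') (0 : Int)
  let dic := numbers.toList.foldl pvOuter dic0
  (PySem.List.min? dic.values (fun x => x)).getD 0

-- ===== PORT B =====
def pvMB : List (List Int) :=
  [[1, 7, 6, 7, 5, 4, 5, 3, 2, 3],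
   [7, 1, 2, 4, 2, 3, 5, 4, 5, 6],
   [6, 2, 1, 2, 3, 2, 3, 5, 4, 5],
   [7, 4, 2, 1, 5, 3, 2, 6, 5, 4],
   [5, 2, 3, 5, 1, 2, 4, 2, 3, 5],
   [4, 3, 2, 3, 2, 1, 2, 3, 2, 3],
   [5, 5, 3, 2, 4, 2, 1, 5, 3, 2],
   [3, 4, 5, 6, 2, 3, 5, 1, 2, 4],
   [2, 5, 4, 5, 3, 2, 3, 2, 1, 2],
   [3, 6, 5, 4, 5, 3, 2, 4, 2, 1]]

-- int(ch)
def pvIntB (c : Char) : Int := (PySem.Int.ofChars? [c]).getD 0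

-- g[i][j]
def pvIdx (g : List (List Int)) (i j : Int) : Int :=
  PySem.List.pyGetD (PySem.List.pyGetD g i []) j 0

-- g = [[0]*10 for _ in range(10)]
def pvG0 : List (List Int) :=
  (PySem.List.pyRange 0 10 1).map (fun _ => List.replicate 10 (0 : Int))

-- the per-character table comprehension
def pvStepB (g : List (List Int)) (n : Int) : List (List Int) :=
  (PySem.List.pyRange 0 10 1).map (fun l =>
    (PySem.List.pyRange 0 10 1).map (fun r =>
      if l = n then 1 + pvIdx g n r
      else if r = n then 1 + pvIdx g l n
      else min (pvIdx pvMB l n + pvIdx g n r) (pvIdx pvMB r n + pvIdx g l n)))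

def solution_alt (numbers : String) : Int :=
  let g := numbers.toList.reverse.foldl (fun g c => pvStepB g (pvIntB c)) pvG0
  pvIdx g 4 6

-- ===== PRECONDITION & SPEC =====
-- Pre_ excludes exactly the inputs with a non-digit character, on which A's int(n) raises ValueError.
def Pre_solution (numbers : String) : Prop :=
  (numbers.toList.all (fun c => PySem.Chars.isdigit c)) = true
instance (numbers : String) : Decidable (Pre_solution numbers) := by
  unfold Pre_solution; infer_instance

def pvWitness_solution : String := "1756"

def Spec_solution (numbers : String) (out : Int) : Prop := out = solution_alt numbers
instance (numbers : String) (out : Int) : Decidable (Spec_solution numbers out) := by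
  unfold Spec_solution; infer_instance

-- ===== CLAIM (what is proved, stated in full; the proofs are below) =====
def Claim_equal_solution : Prop :=
  ∀ (numbers : String), Dom_solution numbers → Pre_solution numbers →
    Spec_solution numbers (solution numbers)

-- ===== LEMMAS AND PROOFS =====

-- min over a list, none = empty
def pvOmin : Option Int → Option Int → Option Int
  | none, b => b
  | some a, none => some a
  | some a, some b => some (min a b)

def pvL {α : Type} (f : α → Int) (ks : List α) : Option Int :=
  ks.foldr (fun k acc => pvOmin (some (f k)) acc) none

-- min over the entries of a state dict, weighted by a cost-to-go h
def pvF (h : Char × Char → Int) (d : PySem.Dict (Char × Char) Int) : Option Int :=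
  pvL (fun k => d.getD k 0 + h k) d.keys

-- cost-to-go of A's state space, char level
def pvGC : List Char → Char × Char → Int
  | [], _ => 0
  | n :: t, p =>
    if p.1 = n then 1 + pvGC t (n, p.2)
    else if p.2 = n then 1 + pvGC t (p.1, n)
    else min (PySem.List.pyGetD (pvMA.getD p.1 []) (pvIntA n) 0 + pvGC t (n, p.2))
             (PySem.List.pyGetD (pvMA.getD p.2 []) (pvIntA n) 0 + pvGC t (p.1, n))

-- cost-to-go at the Int level (what B's table holds)
def pvGI : List Int → Int → Int → Int
  | [], _, _ => 0
  | n :: t, l, r =>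
    if l = n then 1 + pvGI t n r
    else if r = n then 1 + pvGI t l n
    else min (pvIdx pvMB l n + pvGI t n r) (pvIdx pvMB r n + pvGI t l n)

lemma pvCharEqIff (c d : Char) : c = d ↔ c.toNat = d.toNat :=
  ⟨fun h => h ▸ rfl, fun h => Char.ext (UInt32.toNat_inj.mp h)⟩

lemma pvDigitMem (c : Char) (h : PySem.Chars.isdigit c = true) :
    c = '0' ∨ c = '1' ∨ c = '2' ∨ c = '3' ∨ c = '4' ∨ c = '5' ∨ c = '6' ∨ c = '7' ∨
      c = '8' ∨ c = '9' := by
  have hb : 48 ≤ c.toNat ∧ c.toNat ≤ 57 := by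
    simpa [PySem.Chars.isdigit, Char.le_def, UInt32.le_iff_toNat_le] using h
  have hcases : c.toNat = 48 ∨ c.toNat = 49 ∨ c.toNat = 50 ∨ c.toNat = 51 ∨ c.toNat = 52 ∨
      c.toNat = 53 ∨ c.toNat = 54 ∨ c.toNat = 55 ∨ c.toNat = 56 ∨ c.toNat = 57 := by omega
  simp only [pvCharEqIff]
  exact hcases

lemma pvIntA_range (c : Char) (h : PySem.Chars.isdigit c = true) :
    0 ≤ pvIntA c ∧ pvIntA c < 10 := by
  rcases pvDigitMem c h with h | h | h | h | h | h | h | h | h | h <;> subst h <;> decide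

lemma pvIntA_inj (a b : Char) (ha : PySem.Chars.isdigit a = true)
    (hb : PySem.Chars.isdigit b = true) : pvIntA a = pvIntA b ↔ a = b := by
  rcases pvDigitMem a ha with h | h | h | h | h | h | h | h | h | h <;>
    rcases pvDigitMem b hb with h' | h' | h' | h' | h' | h' | h' | h' | h' | h' <;>
      subst h <;> subst h' <;> decide

lemma pvRow_eq (a : Char) (ha : PySem.Chars.isdigit a = true) :
    pvMA.getD a [] = PySem.List.pyGetD pvMB (pvIntA a) [] := by
  rcases pvDigitMem a ha with h | h | h | h | h | h | h | h | h | h <;> subst h <;> decide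

-- ---- pvOmin / pvL toolkit ----
lemma pvOmin_none_right (a : Option Int) : pvOmin a none = a := by cases a <;> rfl

lemma pvOmin_assoc (a b c : Option Int) : pvOmin (pvOmin a b) c = pvOmin a (pvOmin b c) := by
  cases a <;> cases b <;> cases c <;> simp [pvOmin, min_assoc]

lemma pvL_cons {α : Type} (f : α → Int) (k : α) (ks : List α) :
    pvL f (k :: ks) = pvOmin (some (f k)) (pvL f ks) := rfl

lemma pvL_append {α : Type} (f : α → Int) (xs ys : List α) :
    pvL f (xs ++ ys) = pvOmin (pvL f xs) (pvL f ys) := by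
  induction xs with
  | nil => rfl
  | cons x xs ih => simp [pvL_cons, ih, pvOmin_assoc]

lemma pvL_map {α β : Type} (f : β → Int) (φ : α → β) (ks : List α) :
    pvL f (ks.map φ) = pvL (fun k => f (φ k)) ks := by
  induction ks with
  | nil => rfl
  | cons x xs ih => simp [pvL_cons, ih]

lemma pvL_congr {α : Type} (f g : α → Int) (ks : List α)
    (h : ∀ k ∈ ks, f k = g k) : pvL f ks = pvL g ks := by
  induction ks with
  | nil => rfl
  | cons x xs ih =>
      simp [pvL_cons, h x (by simp), ih (fun k hk => h k (by simp [hk]))]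

lemma pvL_absorb {α : Type} (f : α → Int) (ks : List α) (k : α) (x : Int)
    (hk : k ∈ ks) (hle : f k ≤ x) : pvOmin (pvL f ks) (some x) = pvL f ks := by
  induction ks with
  | nil => cases hk
  | cons y ys ih =>
      rcases List.mem_cons.mp hk with rfl | hk'
      · cases hys : pvL f ys <;>
          simp [pvL_cons, hys, pvOmin] <;> omega
      · have := ih hk'
        cases hys : pvL f ys with
        | none =>
            cases ys with
            | nil => cases hk'
            | cons z zs =>
                rw [pvL_cons] at hys
                cases h2 : pvL f zs <;> rw [h2] at hys <;> simp [pvOmin] at hys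
        | some m =>
            rw [hys] at this
            simp only [pvOmin, Option.some.injEq] at this
            simp [pvL_cons, hys, pvOmin, min_assoc, this]
lemma pvL_update {α : Type} [DecidableEq α] (f : α → Int) (ks : List α) (k : α) (x : Int)
    (hk : k ∈ ks) (hle : x ≤ f k) :
    pvL (fun j => if j = k then x else f j) ks = pvOmin (pvL f ks) (some x) := by
  induction ks with
  | nil => cases hk
  | cons y ys ih =>
      by_cases hky : k = y
      · subst hky
        by_cases hmem : k ∈ ys
        · rw [pvL_cons, pvL_cons, ih hmem]
          cases h2 : pvL f ys <;> simp [pvOmin] <;> omega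
        · have hg : pvL (fun j => if j = k then x else f j) ys = pvL f ys :=
            pvL_congr _ _ _ (fun j hj => by
              have : j ≠ k := fun h => hmem (h ▸ hj)
              simp [this])
          rw [pvL_cons, pvL_cons, hg]
          cases h2 : pvL f ys <;> simp [pvOmin] <;> omega
      · have hmem : k ∈ ys := by
          rcases List.mem_cons.mp hk with h | h
          · exact absurd h hky
          · exact h
        rw [pvL_cons, pvL_cons, ih hmem]
        have hy : (if y = k then x else f y) = f y := by
          have : y ≠ k := fun h => hky h.symm
          simp [this]
        rw [hy]
        cases h2 : pvL f ys with
        | none => simp [pvOmin]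
        | some m => simp [pvOmin]

-- ---- the setMin lemma ----
lemma pvF_setMin (h : Char × Char → Int) (d : PySem.Dict (Char × Char) Int)
    (k : Char × Char) (v : Int) :
    pvF h (pvSetMin d k v) = pvOmin (pvF h d) (some (v + h k)) := by
  unfold pvSetMin
  split
  case isTrue hcond =>
    by_cases hc : d.contains k = true
    · -- key present, strictly improving: keys unchanged, value updated
      have hgt : v < d.getD k 0 := by
        simp [hc] at hcond
        omega
      have hmem : k ∈ d.keys := (PySem.Dict.contains_iff_mem_keys d k).mp hc
      unfold pvF
      rw [PySem.Dict.keys_insert_of_contains d v hc]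
      rw [pvL_congr (fun j => (d.insert k v).getD j 0 + h j)
            (fun j => if j = k then v + h k else d.getD j 0 + h j) d.keys
            (fun j _ => by
              show (d.insert k v).getD j 0 + h j = _
              rw [PySem.Dict.getD_insert d k j v 0]
              split_ifs with hj <;> simp [hj])]
      exact pvL_update (fun j => d.getD j 0 + h j) d.keys k (v + h k) hmem
        (by show v + h k ≤ d.getD k 0 + h k; omega)
    · -- new key: appended at the end
      have hc' : d.contains k = false := by
        cases hcc : d.contains k
        · rfl
        · exact absurd hcc hc
      have hnot : k ∉ d.keys := fun hm => by
        rw [(PySem.Dict.contains_iff_mem_keys d k).mpr hm] at hc'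
        cases hc'
      unfold pvF
      rw [PySem.Dict.keys_insert_of_not_contains d v hc', pvL_append]
      have h1 : pvL (fun j => (d.insert k v).getD j 0 + h j) d.keys =
          pvL (fun j => d.getD j 0 + h j) d.keys :=
        pvL_congr _ _ _ (fun j hj => by
          show (d.insert k v).getD j 0 + h j = _
          rw [PySem.Dict.getD_insert d k j v 0]
          have : j ≠ k := fun hjk => hnot (hjk ▸ hj)
          simp [this])
      have h2 : pvL (fun j => (d.insert k v).getD j 0 + h j) [k] = some (v + h k) := by
        show pvOmin (some ((d.insert k v).getD k 0 + h k)) none = _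
        rw [PySem.Dict.getD_insert d k k v 0]
        simp [pvOmin]
      rw [h1, h2]
  case isFalse hcond =>
    -- key present with value ≤ v: dict unchanged, the new candidate is absorbed
    have hc : d.contains k = true := by
      cases hcc : d.contains k
      · simp [hcc] at hcond
      · rfl
    have hle : d.getD k 0 ≤ v := by
      simp [hc] at hcond
      omega
    have hmem : k ∈ d.keys := (PySem.Dict.contains_iff_mem_keys d k).mp hc
    exact (pvL_absorb (fun j => d.getD j 0 + h j) d.keys k (v + h k) hmem
      (by show d.getD k 0 + h k ≤ v + h k; omega)).symm

lemma pvSetMin_nodup (d : PySem.Dict (Char × Char) Int) (k : Char × Char) (v : Int)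
    (hnd : d.keys.Nodup) : (pvSetMin d k v).keys.Nodup := by
  unfold pvSetMin
  split
  · exact PySem.Dict.nodup_keys_insert _ _ _ hnd
  · exact hnd

lemma pvInner_nodup (n : Char) (d : PySem.Dict (Char × Char) Int) (t : (Char × Char) × Int)
    (hnd : d.keys.Nodup) : (pvInner n d t).keys.Nodup := by
  simp only [pvInner]
  split
  · exact pvSetMin_nodup _ _ _ hnd
  · split
    · exact pvSetMin_nodup _ _ _ hnd
    · exact pvSetMin_nodup _ _ _ (pvSetMin_nodup _ _ _ hnd)

-- contribution of one queue triple at char n, with cost-to-go h for the rest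
def pvContrib (h : Char × Char → Int) (n : Char) (t : (Char × Char) × Int) : Int :=
  t.2 + (if t.1.1 = n then 1 + h (n, t.1.2)
    else if t.1.2 = n then 1 + h (t.1.1, n)
    else min (PySem.List.pyGetD (pvMA.getD t.1.1 []) (pvIntA n) 0 + h (n, t.1.2))
             (PySem.List.pyGetD (pvMA.getD t.1.2 []) (pvIntA n) 0 + h (t.1.1, n)))

lemma pvF_inner (hh : Char × Char → Int) (n : Char) (d : PySem.Dict (Char × Char) Int)
    (t : (Char × Char) × Int) :
    pvF hh (pvInner n d t) = pvOmin (pvF hh d) (some (pvContrib hh n t)) := by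
  simp only [pvInner, pvContrib]
  split_ifs with h1 h2
  · rw [pvF_setMin]
    have : t.2 + 1 + hh (n, t.1.2) = t.2 + (1 + hh (n, t.1.2)) := by ring
    rw [this]
  · rw [pvF_setMin]
    have : t.2 + 1 + hh (t.1.1, n) = t.2 + (1 + hh (t.1.1, n)) := by ring
    rw [this]
  · rw [pvF_setMin, pvF_setMin, pvOmin_assoc]
    congr 1
    show pvOmin (some _) (some _) = _
    simp only [pvOmin, Option.some.injEq]
    omega

lemma pvF_foldl (hh : Char × Char → Int) (n : Char) (q : List ((Char × Char) × Int))
    (d : PySem.Dict (Char × Char) Int) :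
    pvF hh (q.foldl (pvInner n) d) = pvOmin (pvF hh d) (pvL (pvContrib hh n) q) := by
  induction q generalizing d with
  | nil => simp [pvL, pvOmin_none_right]
  | cons t q ih =>
      rw [List.foldl_cons, ih _, pvF_inner hh n d t, pvL_cons, pvOmin_assoc]

lemma pvFoldlInner_nodup (n : Char) (q : List ((Char × Char) × Int))
    (d : PySem.Dict (Char × Char) Int) (hnd : d.keys.Nodup) :
    (q.foldl (pvInner n) d).keys.Nodup := by
  induction q generalizing d with
  | nil => exact hnd
  | cons t q ih => exact ih _ (pvInner_nodup n d t hnd)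

lemma pvOuter_nodup (d : PySem.Dict (Char × Char) Int) (n : Char) :
    (pvOuter d n).keys.Nodup := by
  unfold pvOuter
  exact pvFoldlInner_nodup n _ PySem.Dict.empty (by simp [PySem.Dict.keys_empty])

lemma pvFoldlOuter_nodup (cs : List Char) (d : PySem.Dict (Char × Char) Int)
    (hnd : d.keys.Nodup) : (cs.foldl pvOuter d).keys.Nodup := by
  induction cs generalizing d with
  | nil => exact hnd
  | cons c cs ih => exact ih _ (pvOuter_nodup d c)

lemma pvF_empty (hh : Char × Char → Int) : pvF hh PySem.Dict.empty = none := by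
  unfold pvF
  rw [PySem.Dict.keys_empty]
  rfl

lemma pvF_outer_step (cs : List Char) (n : Char) (d : PySem.Dict (Char × Char) Int) :
    pvF (pvGC cs) (pvOuter d n) = pvF (pvGC (n :: cs)) d := by
  unfold pvOuter
  rw [pvF_foldl, pvF_empty, pvL_map]
  show pvOmin none _ = _
  show pvL (fun k => pvContrib (pvGC cs) n (k, d.getD k 0)) d.keys = _
  exact pvL_congr _ _ _ (fun k _ => rfl)

lemma pvF_outer (cs : List Char) (d : PySem.Dict (Char × Char) Int) :
    pvF (pvGC cs) d = pvF (fun _ => 0) (cs.foldl pvOuter d) := by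
  induction cs generalizing d with
  | nil => exact pvL_congr _ _ _ (fun k _ => rfl)
  | cons n cs ih => rw [List.foldl_cons, ← ih, pvF_outer_step]

-- ---- min? of values vs pvF ----
lemma pvL_id_cons (x : Int) (t : List Int) : pvL (fun y => y) (x :: t) = some (t.foldl min x) := by
  induction t generalizing x with
  | nil => rfl
  | cons y t ih =>
      rw [pvL_cons, ih y, List.foldl_cons]
      rw [List.foldl_assoc]
      rfl

lemma pvMin?_eq_pvL (xs : List Int) :
    PySem.List.min? xs (fun x => x) = pvL (fun x => x) xs := by
  cases xs with
  | nil => simp [PySem.List.min?_eq_none_iff, pvL]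
  | cons x t => rw [PySem.List.min?_id_cons, pvL_id_cons]

-- ---- phase A: solution = pvGC ----
lemma pvSolution_eq_GC (numbers : String) :
    solution numbers = pvGC numbers.toList ('4', '6') := by
  show (PySem.List.min?
      ((numbers.toList.foldl pvOuter (PySem.Dict.empty.insert ('4', '6') (0 : Int))).values)
      (fun x => x)).getD 0 = _
  have hnd0 : (PySem.Dict.empty.insert ('4', '6') (0 : Int)).keys.Nodup := by decide
  have hL : pvF (pvGC numbers.toList) (PySem.Dict.empty.insert ('4', '6') (0 : Int)) =
      some (pvGC numbers.toList ('4', '6')) := by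
    show pvOmin (some ((PySem.Dict.empty.insert ('4', '6') (0 : Int)).getD ('4', '6') 0 +
      pvGC numbers.toList ('4', '6'))) none = _
    have hz : (PySem.Dict.empty.insert ('4', '6') (0 : Int)).getD ('4', '6') 0 = 0 := by decide
    rw [hz, pvOmin_none_right, zero_add]
  have hndf := pvFoldlOuter_nodup numbers.toList _ hnd0
  have hmin : PySem.List.min?
      ((numbers.toList.foldl pvOuter (PySem.Dict.empty.insert ('4', '6') (0 : Int))).values)
      (fun x => x) = some (pvGC numbers.toList ('4', '6')) := by
    rw [pvMin?_eq_pvL, PySem.Dict.values_eq_map_keys _ hndf 0, pvL_map]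
    rw [pvL_congr (fun k => (numbers.toList.foldl pvOuter
          (PySem.Dict.empty.insert ('4', '6') (0 : Int))).getD k 0)
        (fun k => (numbers.toList.foldl pvOuter
          (PySem.Dict.empty.insert ('4', '6') (0 : Int))).getD k 0 + (fun _ => (0 : Int)) k) _
        (fun k _ => by simp)]
    show pvF (fun _ => 0) _ = _
    rw [← pvF_outer, hL]
  rw [hmin]
  rfl

-- ---- phase B: solution_alt = pvGI ----
lemma pvIdx_stepB (g : List (List Int)) (n l r : Int) (hl0 : 0 ≤ l) (hl : l < 10)
    (hr0 : 0 ≤ r) (hr : r < 10) :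
    pvIdx (pvStepB g n) l r =
      (if l = n then 1 + pvIdx g n r
       else if r = n then 1 + pvIdx g l n
       else min (pvIdx pvMB l n + pvIdx g n r) (pvIdx pvMB r n + pvIdx g l n)) := by
  show PySem.List.pyGetD (PySem.List.pyGetD (pvStepB g n) l []) r 0 = _
  unfold pvStepB
  rw [PySem.List.pyGetD_map_pyRange_of_nonneg _ 10 l [] hl0 hl,
    PySem.List.pyGetD_map_pyRange_of_nonneg _ 10 r 0 hr0 hr]

lemma pvIdx_G0 (l r : Int) (hl0 : 0 ≤ l) (hl : l < 10) (hr0 : 0 ≤ r) (hr : r < 10) :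
    pvIdx pvG0 l r = 0 := by
  unfold pvG0 pvIdx
  rw [PySem.List.pyGetD_map_pyRange_of_nonneg _ 10 l [] hl0 hl]
  rw [PySem.List.pyGetD_eq_getElem]
  · exact List.getElem_replicate ..
  · exact hr0
  · rw [List.length_replicate]; omega

lemma pvFoldrB (cs : List Char) (hcs : ∀ c ∈ cs, PySem.Chars.isdigit c = true)
    (l r : Int) (hl0 : 0 ≤ l) (hl : l < 10) (hr0 : 0 ≤ r) (hr : r < 10) :
    pvIdx (cs.foldr (fun c g => pvStepB g (pvIntB c)) pvG0) l r = pvGI (cs.map pvIntA) l r := by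
  induction cs generalizing l r with
  | nil => exact pvIdx_G0 l r hl0 hl hr0 hr
  | cons c cs ih =>
      have hd := hcs c (by simp)
      have hn := pvIntA_range c hd
      have hcs' : ∀ x ∈ cs, PySem.Chars.isdigit x = true := fun x hx => hcs x (by simp [hx])
      rw [List.foldr_cons, pvIdx_stepB _ _ l r hl0 hl hr0 hr]
      show _ = pvGI (pvIntA c :: cs.map pvIntA) l r
      have hBA : pvIntB c = pvIntA c := rfl
      rw [hBA, ih hcs' (pvIntA c) r hn.1 hn.2 hr0 hr, ih hcs' l (pvIntA c) hl0 hl hn.1 hn.2]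
      rfl

lemma pvSolutionAlt_eq_GI (numbers : String) (hpre : Pre_solution numbers) :
    solution_alt numbers = pvGI (numbers.toList.map pvIntA) 4 6 := by
  have hall : ∀ c ∈ numbers.toList, PySem.Chars.isdigit c = true := by
    simpa [Pre_solution, List.all_eq_true] using hpre
  show pvIdx (numbers.toList.reverse.foldl (fun g c => pvStepB g (pvIntB c)) pvG0) 4 6 = _
  rw [List.foldl_reverse]
  exact pvFoldrB numbers.toList hall 4 6 (by norm_num) (by norm_num) (by norm_num) (by norm_num)

-- ---- bridge: pvGC = pvGI on digit strings ----
lemma pvGC_eq_GI (cs : List Char) (a b : Char) (hcs : ∀ c ∈ cs, PySem.Chars.isdigit c = true)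
    (ha : PySem.Chars.isdigit a = true) (hb : PySem.Chars.isdigit b = true) :
    pvGC cs (a, b) = pvGI (cs.map pvIntA) (pvIntA a) (pvIntA b) := by
  induction cs generalizing a b with
  | nil => rfl
  | cons n cs ih =>
      have hn := hcs n (by simp)
      have hcs' : ∀ x ∈ cs, PySem.Chars.isdigit x = true := fun x hx => hcs x (by simp [hx])
      show (if a = n then 1 + pvGC cs (n, b)
        else if b = n then 1 + pvGC cs (a, n)
        else min (PySem.List.pyGetD (pvMA.getD a []) (pvIntA n) 0 + pvGC cs (n, b))
                 (PySem.List.pyGetD (pvMA.getD b []) (pvIntA n) 0 + pvGC cs (a, n))) = _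
      show _ = (if pvIntA a = pvIntA n then 1 + pvGI (cs.map pvIntA) (pvIntA n) (pvIntA b)
        else if pvIntA b = pvIntA n then 1 + pvGI (cs.map pvIntA) (pvIntA a) (pvIntA n)
        else min (pvIdx pvMB (pvIntA a) (pvIntA n) + pvGI (cs.map pvIntA) (pvIntA n) (pvIntA b))
                 (pvIdx pvMB (pvIntA b) (pvIntA n) + pvGI (cs.map pvIntA) (pvIntA a) (pvIntA n)))
      by_cases h1 : a = n
      · rw [if_pos h1, if_pos ((pvIntA_inj a n ha hn).mpr h1), ih n b hcs' hn hb]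
      · rw [if_neg h1, if_neg (fun he => h1 ((pvIntA_inj a n ha hn).mp he))]
        by_cases h2 : b = n
        · rw [if_pos h2, if_pos ((pvIntA_inj b n hb hn).mpr h2), ih a n hcs' ha hn]
        · rw [if_neg h2, if_neg (fun he => h2 ((pvIntA_inj b n hb hn).mp he))]
          rw [pvRow_eq a ha, pvRow_eq b hb, ih n b hcs' hn hb, ih a n hcs' ha hn]
          rfl

-- ===== VERDICT (by name: the statement is the Claim_ definition above) =====
theorem solution_spec : Claim_equal_solution := by
  intro numbers _hdom hpre
  unfold Spec_solution
  have hall : ∀ c ∈ numbers.toList, PySem.Chars.isdigit c = true := by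
    simpa [Pre_solution, List.all_eq_true] using hpre
  rw [pvSolution_eq_GC numbers, pvSolutionAlt_eq_GI numbers hpre,
    pvGC_eq_GI numbers.toList '4' '6' hall (by decide) (by decide)]
  have h4 : (PySem.Int.ofChars? ['4']).getD 0 = (4 : Int) := by decide
  have h6 : (PySem.Int.ofChars? ['6']).getD 0 = (6 : Int) := by decide
  simp only [pvIntA, h4, h6]
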